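-- pv_equiv track=rewrite | github.com/Mathias-a/NmFrameMog | Astar-Island/mocker/main.py | generate_full_grid
-- ===== SOURCE A (Python) =====
-- from typing import Any, Dict, List, Optional
--
-- MAP_WIDTH = 40
--
-- MAP_HEIGHT = 40
--
-- def generate_full_grid(seed_index: int) -> List[List[int]]:
--     # Simple deterministic grid based on seed_index
--     grid = []
--     for y in range(MAP_HEIGHT):
--         row = []
--         for x in range(MAP_WIDTH):
--             val = 10 if (x + y + seed_index) % 5 == 0 else 11  # mixing ocean and plains
--             row.append(val)
--         grid.append(row)
--     return grid
-- ===== SOURCE B (Python) =====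
-- from typing import List
--
-- MAP_WIDTH = 40
-- MAP_HEIGHT = 40
--
-- def generate_full_grid(seed_index: int) -> List[List[int]]:
--     # First row by the modulo test; each later row is the previous one rotated
--     # left by one cell (period 5 divides the width, so rotation is exact).
--     row = [10 if (x + seed_index) % 5 == 0 else 11 for x in range(MAP_WIDTH)]
--     grid = [row]
--     for _ in range(MAP_HEIGHT - 1):
--         row = row[1:] + row[:1]
--         grid.append(row)
--     return grid
-- ===== Notes on version B (the rewrite author's own statement) =====
-- stated objective: alternative
-- what changed: Instead of recomputing the modulo test for every cell in nested loops, B computes only the first row with the modulo test and derives each subsequent row as a fresh left-rotation of the previous row (valid because the grid width is a multiple of the period of the pattern).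
import Mathlib
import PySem

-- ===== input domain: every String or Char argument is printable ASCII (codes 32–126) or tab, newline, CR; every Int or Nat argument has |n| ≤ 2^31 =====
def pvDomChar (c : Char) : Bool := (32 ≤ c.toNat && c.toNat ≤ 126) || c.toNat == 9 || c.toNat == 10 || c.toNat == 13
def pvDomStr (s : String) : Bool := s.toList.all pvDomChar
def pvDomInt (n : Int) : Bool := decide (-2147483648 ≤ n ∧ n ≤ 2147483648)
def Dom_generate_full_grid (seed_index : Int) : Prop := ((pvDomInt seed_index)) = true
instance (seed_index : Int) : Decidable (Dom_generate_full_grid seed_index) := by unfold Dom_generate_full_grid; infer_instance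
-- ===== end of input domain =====

-- B builds only the first row with the modulo test and derives each later row as a
-- fresh left-rotation of the previous one (the period 5 divides the width 40).

-- ===== PORT A =====
def generate_full_grid (seed_index : Int) : List (List Int) :=
  (PySem.List.pyRange 0 40 1).foldl (fun grid y =>
    grid ++ [(PySem.List.pyRange 0 40 1).foldl (fun row x =>
      row ++ [if PySem.Int.mod (x + y + seed_index) 5 == 0 then (10 : Int) else 11]) []]) []

-- ===== PORT B =====
-- row[1:] is List.drop 1, row[:1] is List.take 1 (exact: nonnegative in-range slice bounds)
def generate_full_grid_alt (seed_index : Int) : List (List Int) :=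
  let row0 : List Int :=
    (PySem.List.pyRange 0 40 1).map (fun x => if PySem.Int.mod (x + seed_index) 5 == 0 then (10 : Int) else 11)
  let st := (PySem.List.pyRange 0 39 1).foldl (fun (st : List (List Int) × List Int) _ =>
      let r := st.2.drop 1 ++ st.2.take 1
      (st.1 ++ [r], r)) ([row0], row0)
  st.1

-- ===== PRECONDITION & SPEC =====
def Spec_generate_full_grid (seed_index : Int) (out : List (List Int)) : Prop := out = generate_full_grid_alt seed_index
instance (seed_index : Int) (out : List (List Int)) : Decidable (Spec_generate_full_grid seed_index out) := by unfold Spec_generate_full_grid; infer_instance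

-- ===== CLAIM (what is proved, stated in full; the proofs are below) =====
def Claim_equal_generate_full_grid : Prop := ∀ (seed_index : Int), Dom_generate_full_grid seed_index → Spec_generate_full_grid seed_index (generate_full_grid seed_index)

-- ===== LEMMAS AND PROOFS =====

-- the row of A's grid at height y
def pvRow (seed y : Int) : List Int :=
  (PySem.List.pyRange 0 40 1).map (fun x => if PySem.Int.mod (x + y + seed) 5 == 0 then (10 : Int) else 11)

theorem pvRange40 : PySem.List.pyRange 0 40 1 =
    [0,1,2,3,4,5,6,7,8,9,10,11,12,13,14,15,16,17,18,19,
     20,21,22,23,24,25,26,27,28,29,30,31,32,33,34,35,36,37,38,39] := by decide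

-- rotating a row left by one gives the next row
theorem pvRow_rot (seed y : Int) :
    pvRow seed (y + 1) = (pvRow seed y).drop 1 ++ (pvRow seed y).take 1 := by
  simp only [pvRow, pvRange40, List.map_cons, List.map_nil,
    PySem.Int.mod_eq_emod_of_pos (show (0:Int) < 5 by norm_num), List.drop, List.take,
    List.cons_append, List.nil_append, List.cons.injEq, and_true, beq_iff_eq]
  repeat' apply And.intro
  all_goals (split_ifs with h1 h2 <;> omega)

-- the rotation fold produces consecutive rows
theorem pvFold_rot (seed : Int) : ∀ (l : List Int) (acc : List (List Int)) (y : Int),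
    l.foldl (fun (st : List (List Int) × List Int) _ =>
        (st.1 ++ [st.2.drop 1 ++ st.2.take 1], st.2.drop 1 ++ st.2.take 1)) (acc, pvRow seed y)
      = (acc ++ (List.range l.length).map (fun k : Nat => pvRow seed (y + 1 + (k : Int))),
         pvRow seed (y + (l.length : Int))) := by
  intro l
  induction l with
  | nil => intro acc y; simp
  | cons a l ih =>
    intro acc y
    simp only [List.foldl_cons, ← pvRow_rot seed y]
    rw [ih (acc ++ [pvRow seed (y + 1)]) (y + 1)]
    simp only [List.length_cons, List.range_succ_eq_map, List.map_cons, List.map_map,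
      Prod.mk.injEq]
    refine ⟨?_, ?_⟩
    · simp only [List.append_assoc, List.singleton_append]
      congr 2
      · norm_num
      · apply List.map_congr_left
        intro k _
        simp only [Function.comp]
        congr 1
        push_cast
        ring
    · congr 1
      push_cast
      ring

theorem pvA_eq (seed : Int) :
    generate_full_grid seed = (PySem.List.pyRange 0 40 1).map (fun y => pvRow seed y) := by
  unfold generate_full_grid
  rw [PySem.List.foldl_append_singleton_eq_map, List.nil_append]
  apply List.map_congr_left
  intro y _
  rw [PySem.List.foldl_append_singleton_eq_map, List.nil_append]
  rfl

theorem pvRow0 (seed : Int) :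
    (PySem.List.pyRange 0 40 1).map (fun x => if PySem.Int.mod (x + seed) 5 == 0 then (10 : Int) else 11)
      = pvRow seed 0 := by
  apply List.map_congr_left
  intro x _
  norm_num

-- ===== VERDICT (by name: the statement is the Claim_ definition above) =====
theorem generate_full_grid_spec : Claim_equal_generate_full_grid := by
  intro seed _
  unfold Spec_generate_full_grid
  dsimp only [generate_full_grid_alt]
  rw [pvRow0 seed, pvFold_rot seed (PySem.List.pyRange 0 39 1) [pvRow seed 0] 0, pvA_eq seed]
  show _ = [pvRow seed 0] ++ _
  rw [pvRange40]
  have h39 : List.range (PySem.List.pyRange 0 39 1).length =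
      [0,1,2,3,4,5,6,7,8,9,10,11,12,13,14,15,16,17,18,19,
       20,21,22,23,24,25,26,27,28,29,30,31,32,33,34,35,36,37,38] := by decide
  rw [h39]
  norm_num
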